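-- pv_equiv track=rewrite | github.com/nghiempt/dspp | approach/make_dataset/make_final_dataset_only_prompt.py | formated_data
-- ===== SOURCE A (Python) =====
-- def formated_data(content):
--     content_data = ''
--     lines = content.splitlines()
--     for i in range(len(lines)):
--         category = data_section = data_type = purpose = optional = ''
--         if lines[i].startswith(' data-section: No data shared with third parties'):
--             data_section = lines[i].replace(' data-section: ', '')
--             content_data = content_data + data_section
--         if lines[i].startswith(' data-section: Data shared'):
--             data_section = lines[i].replace(' data-section: ', '')
--             for j in range(i + 1, len(lines)):
--                 if lines[j].startswith('\t category: '):
--                     category = lines[j].replace('\t category: ', '')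
--                     content_data = content_data + category+"("
--                     for k in range(j + 1, len(lines)):
--                         if lines[k].startswith('\t\tdata-type: '):
--                             data_type = lines[k].replace(
--                                 '\t\tdata-type: ', '')
--                             content_data = content_data + data_type+", "
--                         elif lines[k].startswith('\t\tpurpose: '):
--                             purpose = lines[k].replace('\t\tpurpose: ', '')
--                             if purpose.endswith(' · Optional'):
--                                 optional = True
--                                 purpose = purpose.replace(
--                                     ' · Optional', '')
--                             else:
--                                 optional = False
--                             purpose = purpose.replace(', ', ' - ')
--
--                         elif lines[j].startswith('\t category: '):
--                             content_data = content_data[:-2] + "), "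
--                             break
--                 elif lines[j].startswith(' data-section: '):
--                     break
--     if not content_data.startswith('No'):
--         content_data = content_data[:-2] + ";"
--     else:
--         content_data = content_data + ";"
--     return content_data
-- ===== SOURCE B (Python) =====
-- def _handle01(line, out, state):
--     if line.startswith(' data-section: '):
--         if line.startswith(' data-section: No data shared with third parties'):
--             return out + line.replace(' data-section: ', ''), 0
--         if line.startswith(' data-section: Data shared'):
--             return out, 1
--         return out, 0
--     if state == 1 and line.startswith('\t category: '):
--         return out + line.replace('\t category: ', '') + '(', 2
--     return out, state
--
--
-- def _handle(line, out, state):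
--     if state == 2:
--         if line.startswith('\t\tdata-type: '):
--             return out + line.replace('\t\tdata-type: ', '') + ', ', 2
--         if line.startswith('\t\tpurpose: '):
--             return out, 2
--         return _handle01(line, out[:-2] + '), ', 1)
--     return _handle01(line, out, state)
--
--
-- def formated_data(content):
--     out, state = '', 0
--     for line in content.splitlines():
--         out, state = _handle(line, out, state)
--     if out.startswith('No'):
--         return out + ';'
--     return out[:-2] + ';'
-- ===== Notes on version B (the rewrite author's own statement) =====
-- stated objective: simpler
-- what changed: Replaced A's triple-nested index loops (each 'Data shared' section rescans forward, each category rescans again, with break-out-of-inner-scan logic) by a single left-to-right pass over the lines driven by an explicit three-state machine (outside / in-section / in-category).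
import Mathlib
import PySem

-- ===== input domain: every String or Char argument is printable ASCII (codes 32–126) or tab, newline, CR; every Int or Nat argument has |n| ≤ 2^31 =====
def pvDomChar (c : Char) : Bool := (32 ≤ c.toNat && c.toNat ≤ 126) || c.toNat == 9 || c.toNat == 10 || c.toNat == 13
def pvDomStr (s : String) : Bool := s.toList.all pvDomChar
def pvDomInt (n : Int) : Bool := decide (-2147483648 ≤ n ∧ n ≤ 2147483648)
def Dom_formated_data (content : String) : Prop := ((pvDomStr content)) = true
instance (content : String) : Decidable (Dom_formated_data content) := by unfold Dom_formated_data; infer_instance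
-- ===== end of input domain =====

-- B replaces A's triple-nested rescanning index loops by a single pass with an
-- explicit state machine (objective: simpler / single pass); return values are equal.

-- ===== PORT A =====
-- inner k-loop of A; `jline` is lines[j], the category line the k-loop was started under
def pvKloop (jline : String) : List String → String → String
  | [], cd => cd
  | l :: rest, cd =>
    if PySem.Str.startswith l "\t\tdata-type: " then
      pvKloop jline rest (cd ++ PySem.Str.replace l "\t\tdata-type: " "" ++ ", ")
    else if PySem.Str.startswith l "\t\tpurpose: " then
      -- Python computes purpose/optional here but they never affect the output
      pvKloop jline rest cd
    else if PySem.Str.startswith jline "\t category: " then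
      PySem.Str.slice cd none (some (-2)) ++ "), "   -- break
    else
      pvKloop jline rest cd

-- middle j-loop of A
def pvJloop : List String → String → String
  | [], cd => cd
  | l :: rest, cd =>
    if PySem.Str.startswith l "\t category: " then
      pvJloop rest (pvKloop l rest (cd ++ PySem.Str.replace l "\t category: " "" ++ "("))
    else if PySem.Str.startswith l " data-section: " then cd   -- break
    else pvJloop rest cd

-- outer i-loop of A
def pvOuter : List String → String → String
  | [], cd => cd
  | l :: rest, cd =>
    let cd1 := if PySem.Str.startswith l " data-section: No data shared with third parties"
               then cd ++ PySem.Str.replace l " data-section: " "" else cd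
    let cd2 := if PySem.Str.startswith l " data-section: Data shared"
               then pvJloop rest cd1 else cd1
    pvOuter rest cd2

def formated_data (content : String) : String :=
  let cd := pvOuter (PySem.Str.splitlines content) ""
  if PySem.Str.startswith cd "No" then cd ++ ";"
  else PySem.Str.slice cd none (some (-2)) ++ ";"

-- ===== PORT B =====
-- state: 0 outside any section, 1 inside a "Data shared" section, 2 inside a category
def pvHandle01 (line out : String) (state : Nat) : String × Nat :=
  if PySem.Str.startswith line " data-section: " then
    if PySem.Str.startswith line " data-section: No data shared with third parties" then
      (out ++ PySem.Str.replace line " data-section: " "", 0)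
    else if PySem.Str.startswith line " data-section: Data shared" then (out, 1)
    else (out, 0)
  else if state == 1 && PySem.Str.startswith line "\t category: " then
    (out ++ PySem.Str.replace line "\t category: " "" ++ "(", 2)
  else (out, state)

def pvHandle (line out : String) (state : Nat) : String × Nat :=
  if state == 2 then
    if PySem.Str.startswith line "\t\tdata-type: " then
      (out ++ PySem.Str.replace line "\t\tdata-type: " "" ++ ", ", 2)
    else if PySem.Str.startswith line "\t\tpurpose: " then (out, 2)
    else pvHandle01 line (PySem.Str.slice out none (some (-2)) ++ "), ") 1
  else pvHandle01 line out state

def pvBLoop : List String → String → Nat → String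
  | [], out, _ => out
  | l :: rest, out, st =>
    let p := pvHandle l out st
    pvBLoop rest p.1 p.2

def formated_data_alt (content : String) : String :=
  let out := pvBLoop (PySem.Str.splitlines content) "" 0
  if PySem.Str.startswith out "No" then out ++ ";"
  else PySem.Str.slice out none (some (-2)) ++ ";"

-- ===== PRECONDITION & SPEC =====
def Spec_formated_data (content : String) (out : String) : Prop := out = formated_data_alt content
instance (content : String) (out : String) : Decidable (Spec_formated_data content out) := by unfold Spec_formated_data; infer_instance

-- ===== CLAIM (what is proved, stated in full; the proofs are below) =====
def Claim_equal_formated_data : Prop := ∀ (content : String), Dom_formated_data content → Spec_formated_data content (formated_data content)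

-- ===== LEMMAS AND PROOFS =====

-- startswith is monotone in the prefix
theorem pvSwMono (s p q : String) (h : q.toList <+: p.toList)
    (hp : PySem.Str.startswith s p = true) : PySem.Str.startswith s q = true := by
  simp only [PySem.Str.startswith_eq, PySem.Chars.startswith_iff] at hp ⊢
  exact h.trans hp

theorem pvSwMonoNeg (s p q : String) (h : q.toList <+: p.toList)
    (hq : PySem.Str.startswith s q = false) : PySem.Str.startswith s p = false := by
  rw [Bool.eq_false_iff] at hq ⊢
  exact fun hp => hq (pvSwMono s p q h hp)

-- two incomparable literals cannot both be prefixes of the same string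
theorem pvSwExcl (s p q : String) (h1 : ¬ p.toList <+: q.toList) (h2 : ¬ q.toList <+: p.toList)
    (hp : PySem.Str.startswith s p = true) : PySem.Str.startswith s q = false := by
  rw [Bool.eq_false_iff]
  intro hq
  simp only [PySem.Str.startswith_eq, PySem.Chars.startswith_iff] at hp hq
  rcases List.prefix_or_prefix_of_prefix hp hq with h | h
  · exact h1 h
  · exact h2 h

-- the single state-1 step of B matches A's (j-loop restart + outer continuation),
-- assuming the three invariants already hold for the tail
theorem pvStep1 (l : String) (rest : List String) (cd : String)
    (IHL : ∀ cd, pvOuter rest cd = pvBLoop rest cd 0)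
    (IHM : ∀ cd, pvOuter rest (pvJloop rest cd) = pvBLoop rest cd 1)
    (IHK : ∀ cd j, PySem.Str.startswith j "\t category: " = true →
        pvOuter rest (pvJloop rest (pvKloop j rest cd)) = pvBLoop rest cd 2) :
    pvOuter (l :: rest) (pvJloop (l :: rest) cd)
      = pvBLoop rest (pvHandle01 l cd 1).1 (pvHandle01 l cd 1).2 := by
  cases hC : PySem.Str.startswith l "\t category: " with
  | true =>
    have hS : PySem.Str.startswith l " data-section: " = false :=
      pvSwExcl l "\t category: " " data-section: " (by decide) (by decide) hC
    have hN := pvSwMonoNeg l " data-section: No data shared with third parties" " data-section: " (by decide) hS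
    have hD := pvSwMonoNeg l " data-section: Data shared" " data-section: " (by decide) hS
    simp only [pvOuter, pvJloop, pvHandle01, hC, hS, hN, hD]
    simp only [Bool.false_eq_true, if_false, if_true]
    exact IHK _ l hC
  | false =>
    cases hS : PySem.Str.startswith l " data-section: " with
    | true =>
      cases hN : PySem.Str.startswith l " data-section: No data shared with third parties" with
      | true =>
        have hD : PySem.Str.startswith l " data-section: Data shared" = false :=
          pvSwExcl l _ " data-section: Data shared" (by decide) (by decide) hN
        simp only [pvOuter, pvJloop, pvHandle01, hC, hS, hN, hD]
        simp only [Bool.false_eq_true, if_false, if_true]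
        exact IHL _
      | false =>
        cases hD : PySem.Str.startswith l " data-section: Data shared" with
        | true =>
          simp only [pvOuter, pvJloop, pvHandle01, hC, hS, hN, hD]
          simp only [Bool.false_eq_true, if_false, if_true]
          exact IHM _
        | false =>
          simp only [pvOuter, pvJloop, pvHandle01, hC, hS, hN, hD]
          simp only [Bool.false_eq_true, if_false, if_true]
          exact IHL _
    | false =>
      have hN := pvSwMonoNeg l " data-section: No data shared with third parties" " data-section: " (by decide) hS
      have hD := pvSwMonoNeg l " data-section: Data shared" " data-section: " (by decide) hS
      simp only [pvOuter, pvJloop, pvHandle01, hC, hS, hN, hD]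
      simp only [Bool.false_eq_true, if_false, Bool.and_false]
      exact IHM _

-- the combined loop invariant, by induction on the remaining lines
theorem pvMain : ∀ (rest : List String),
    (∀ cd, pvOuter rest cd = pvBLoop rest cd 0) ∧
    (∀ cd, pvOuter rest (pvJloop rest cd) = pvBLoop rest cd 1) ∧
    (∀ cd j, PySem.Str.startswith j "\t category: " = true →
        pvOuter rest (pvJloop rest (pvKloop j rest cd)) = pvBLoop rest cd 2) := by
  intro rest
  induction rest with
  | nil => exact ⟨fun _ => rfl, fun _ => rfl, fun _ _ _ => rfl⟩
  | cons l rest ih =>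
    obtain ⟨IHL, IHM, IHK⟩ := ih
    refine ⟨?_, ?_, ?_⟩
    · -- state 0
      intro cd
      cases hN : PySem.Str.startswith l " data-section: No data shared with third parties" with
      | true =>
        have hS := pvSwMono l _ " data-section: " (by decide) hN
        have hD : PySem.Str.startswith l " data-section: Data shared" = false :=
          pvSwExcl l _ " data-section: Data shared" (by decide) (by decide) hN
        simp only [pvOuter, pvBLoop, pvHandle, pvHandle01, hN, hS, hD]
        simp only [Bool.false_eq_true, if_false, if_true, show ((0 : Nat) == 2) = false from rfl]
        exact IHL _
      | false =>
        cases hD : PySem.Str.startswith l " data-section: Data shared" with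
        | true =>
          have hS := pvSwMono l _ " data-section: " (by decide) hD
          simp only [pvOuter, pvBLoop, pvHandle, pvHandle01, hN, hD, hS]
          simp only [Bool.false_eq_true, if_false, if_true, show ((0 : Nat) == 2) = false from rfl]
          exact IHM _
        | false =>
          cases hS : PySem.Str.startswith l " data-section: " with
          | true =>
            simp only [pvOuter, pvBLoop, pvHandle, pvHandle01, hN, hD, hS]
            simp only [Bool.false_eq_true, if_false, if_true, show ((0 : Nat) == 2) = false from rfl]
            exact IHL _
          | false =>
            simp only [pvOuter, pvBLoop, pvHandle, pvHandle01, hN, hD, hS]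
            simp only [Bool.false_eq_true, if_false, Bool.false_and,
              show ((0 : Nat) == 2) = false from rfl, show ((0 : Nat) == 1) = false from rfl]
            exact IHL _
    · -- state 1
      intro cd
      have h := pvStep1 l rest cd IHL IHM IHK
      have hRHS : pvBLoop (l :: rest) cd 1
          = pvBLoop rest (pvHandle01 l cd 1).1 (pvHandle01 l cd 1).2 := by
        simp only [pvBLoop, pvHandle, show ((1 : Nat) == 2) = false from rfl,
          Bool.false_eq_true, if_false]
      rw [hRHS.symm] at h
      exact h
    · -- state 2
      intro cd j hj
      cases hT : PySem.Str.startswith l "\t\tdata-type: " with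
      | true =>
        have hC : PySem.Str.startswith l "\t category: " = false :=
          pvSwExcl l _ "\t category: " (by decide) (by decide) hT
        have hS : PySem.Str.startswith l " data-section: " = false :=
          pvSwExcl l _ " data-section: " (by decide) (by decide) hT
        have hN := pvSwMonoNeg l " data-section: No data shared with third parties" " data-section: " (by decide) hS
        have hD := pvSwMonoNeg l " data-section: Data shared" " data-section: " (by decide) hS
        simp only [pvOuter, pvJloop, pvKloop, pvBLoop, pvHandle, hT, hC, hS, hN, hD]
        simp only [Bool.false_eq_true, if_false, if_true, show ((2 : Nat) == 2) = true from rfl]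
        exact IHK _ j hj
      | false =>
        cases hP : PySem.Str.startswith l "\t\tpurpose: " with
        | true =>
          have hC : PySem.Str.startswith l "\t category: " = false :=
            pvSwExcl l _ "\t category: " (by decide) (by decide) hP
          have hS : PySem.Str.startswith l " data-section: " = false :=
            pvSwExcl l _ " data-section: " (by decide) (by decide) hP
          have hN := pvSwMonoNeg l " data-section: No data shared with third parties" " data-section: " (by decide) hS
          have hD := pvSwMonoNeg l " data-section: Data shared" " data-section: " (by decide) hS
          simp only [pvOuter, pvJloop, pvKloop, pvBLoop, pvHandle, hT, hP, hC, hS, hN, hD]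
          simp only [Bool.false_eq_true, if_false, if_true, show ((2 : Nat) == 2) = true from rfl]
          exact IHK _ j hj
        | false =>
          -- foreign line: A closes the category via the k-loop break, B via pvHandle
          have hclose : pvKloop j (l :: rest) cd
              = PySem.Str.slice cd none (some (-2)) ++ "), " := by
            simp only [pvKloop, hT, hP, hj]
            simp only [Bool.false_eq_true, if_false, if_true]
          have h := pvStep1 l rest (PySem.Str.slice cd none (some (-2)) ++ "), ") IHL IHM IHK
          have hRHS : pvBLoop (l :: rest) cd 2
              = pvBLoop rest (pvHandle01 l (PySem.Str.slice cd none (some (-2)) ++ "), ") 1).1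
                  (pvHandle01 l (PySem.Str.slice cd none (some (-2)) ++ "), ") 1).2 := by
            simp only [pvBLoop, pvHandle, hT, hP, show ((2 : Nat) == 2) = true from rfl]
            simp only [Bool.false_eq_true, if_false, if_true]
          rw [hclose, hRHS]
          exact h

-- ===== VERDICT (by name: the statement is the Claim_ definition above) =====
theorem formated_data_spec : Claim_equal_formated_data := by
  intro content _
  unfold Spec_formated_data formated_data formated_data_alt
  rw [(pvMain (PySem.Str.splitlines content)).1 ""]
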